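-- pv_equiv track=rewrite | github.com/PathFinderKR/LLM101 | src/tokenizer.py | _tokenize_with_context
-- ===== SOURCE A (Python) =====
-- from typing import Dict, Optional, List
--
-- def _tokenize_with_context(text: str) -> List[str]:
--     """
--     Split text into context-aware character tokens.
--
--     We:
--       1. Split text into words using a simple regex or split on whitespace.
--       2. For each word, mark each character with B, M, E (begin/middle/end)
--          or S (if it's a single-character word).
--       3. Return the list of tokens.
--
--     Args:
--         text (str): The input text.
--
--     Returns:
--         List[str]: A list of context-aware character tokens.
--     """
--     # Simple way to split on whitespace and keep punctuation separate if desired.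
--     # You might adapt this to your use case.
--     # Example: re.findall(r"\w+|[^\w\s]+", text) would split out punctuation too.
--     words = text.split()
--
--     tokens = []
--     for word in words:
--         # You could also further handle punctuation as separate "words."
--         # For this simple approach, treat them as part of the "word."
--         if len(word) == 1:
--             # single-character word: c_S
--             tokens.append(f"{word}_S")
--         else:
--             # multi-character word
--             # first character: c_B
--             tokens.append(f"{word[0]}_B")
--             # middle characters: c_M
--             for c in word[1:-1]:
--                 tokens.append(f"{c}_M")
--             # last character: c_E
--             tokens.append(f"{word[-1]}_E")
--
--         # Optionally, you might want to treat whitespace as a token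
--         # or separate token to keep spacing info. That is optional.
--
--     return tokens
-- ===== SOURCE B (Python) =====
-- def _tokenize_with_context(text: str):
--     # One streaming pass over the raw text with a one-character lookahead:
--     # a character's label is determined by whether its neighbours are whitespace.
--     tokens = []
--     prev = " "
--     padded = text + " "
--     for cur, nxt in zip(padded, padded[1:]):
--         if not cur.isspace():
--             if prev.isspace() and nxt.isspace():
--                 label = "S"
--             elif prev.isspace():
--                 label = "B"
--             elif nxt.isspace():
--                 label = "E"
--             else:
--                 label = "M"
--             tokens.append(f"{cur}_{label}")
--         prev = cur
--     return tokens
-- ===== Notes on version B (the rewrite author's own statement) =====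
-- stated objective: alternative
-- what changed: B drops the split-into-words stage entirely: a single streaming pass over the raw text (with a one-character lookahead via zip of the text with its shift) labels each non-whitespace character S/B/E/M from whether its two neighbours are whitespace, instead of A's per-word head/middle-slice/tail segment handling.
import Mathlib
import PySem

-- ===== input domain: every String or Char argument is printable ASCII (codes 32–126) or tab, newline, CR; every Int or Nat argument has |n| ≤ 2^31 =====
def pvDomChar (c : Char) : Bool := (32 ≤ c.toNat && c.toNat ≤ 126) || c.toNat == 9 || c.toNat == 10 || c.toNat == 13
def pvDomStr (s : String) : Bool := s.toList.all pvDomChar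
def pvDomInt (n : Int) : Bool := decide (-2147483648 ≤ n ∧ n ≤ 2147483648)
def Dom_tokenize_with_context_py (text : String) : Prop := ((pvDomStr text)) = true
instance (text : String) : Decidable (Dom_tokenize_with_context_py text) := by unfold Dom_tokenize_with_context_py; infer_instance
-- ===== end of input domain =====

-- B replaces A's split-into-words-then-segment-each-word algorithm with a single streaming
-- pass over the raw text that labels each non-whitespace character from whether its two
-- neighbours are whitespace, with no intermediate word list (an alternative algorithm, not claimed faster).

-- ===== PORT A =====
-- word[0] / word[-1] are ported with pyGetD: the words produced by str.split() are
-- never empty, so the index is always in range and the default is never used (exact).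
def tokenize_with_context_py (text : String) : List String :=
  (PySem.Chars.split₀ text.toList).foldl
    (fun tokens word =>
      if PySem.Chars.len word = 1 then
        tokens ++ [String.ofList (word ++ ['_', 'S'])]
      else
        let t1 := tokens ++ [String.ofList [PySem.List.pyGetD word 0 ' ', '_', 'B']]
        let t2 := (PySem.List.slice word (some 1) (some (-1))).foldl
          (fun ts c => ts ++ [String.ofList [c, '_', 'M']]) t1
        t2 ++ [String.ofList [PySem.List.pyGetD word (-1) ' ', '_', 'E']])
    []

-- ===== PORT B =====
-- one pass over zip(padded, padded[1:]) with state (prev, tokens), as in Source B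
def tokenize_with_context_py_alt (text : String) : List String :=
  let padded := text.toList ++ [' ']
  ((padded.zip (PySem.List.slice padded (some 1) none)).foldl
    (fun st p =>
      if PySem.Chars.isspace p.1 then (p.1, st.2)
      else (p.1, st.2 ++ [String.ofList [p.1, '_',
        if PySem.Chars.isspace st.1 && PySem.Chars.isspace p.2 then 'S'
        else if PySem.Chars.isspace st.1 then 'B'
        else if PySem.Chars.isspace p.2 then 'E'
        else 'M']]))
    (' ', [])).2

-- ===== PRECONDITION & SPEC =====
def Spec_tokenize_with_context_py (text : String) (out : List String) : Prop := out = tokenize_with_context_py_alt text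
instance (text : String) (out : List String) : Decidable (Spec_tokenize_with_context_py text out) := by unfold Spec_tokenize_with_context_py; infer_instance

-- ===== CLAIM (what is proved, stated in full; the proofs are below) =====
def Claim_equal_tokenize_with_context_py : Prop := ∀ (text : String), Dom_tokenize_with_context_py text → Spec_tokenize_with_context_py text (tokenize_with_context_py text)

-- ===== LEMMAS AND PROOFS =====

-- the token for one character, given the whitespace-status of its two neighbours
def pvTok (c : Char) (pws nws : Bool) : String :=
  String.ofList [c, '_',
    if pws && nws then 'S' else if pws then 'B' else if nws then 'E' else 'M']

-- whitespace-status of the character following the current one (end of text counts as whitespace)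
def pvNextWs : List Char → Bool
  | [] => true
  | d :: _ => PySem.Chars.isspace d

-- per-character scan of the whole text (what B computes), pw = previous char is whitespace/start
def pvScan : List Char → Bool → List String
  | [], _ => []
  | c :: cs, pw =>
      if PySem.Chars.isspace c then pvScan cs true
      else pvTok c pw (pvNextWs cs) :: pvScan cs false

-- tokens of one complete whitespace-free word, pw = first char is word-initial
def pvEmit : List Char → Bool → List String
  | [], _ => []
  | c :: r, pw => pvTok c pw (pvNextWs r) :: pvEmit r false

-- tokens of a word read so far as w, whose continuation in the text is cs
def pvEmitP : List Char → Bool → List Char → List String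
  | [], _, _ => []
  | c :: r, pw, cs =>
      pvTok c pw (match r with | [] => pvNextWs cs | d :: _ => PySem.Chars.isspace d)
        :: pvEmitP r false cs

-- A's per-word chunk, extracted
def pvChunkA (word : List Char) : List String :=
  if PySem.Chars.len word = 1 then
    [String.ofList (word ++ ['_', 'S'])]
  else
    [String.ofList [PySem.List.pyGetD word 0 ' ', '_', 'B']]
      ++ (PySem.List.slice word (some 1) (some (-1))).map (fun c => String.ofList [c, '_', 'M'])
      ++ [String.ofList [PySem.List.pyGetD word (-1) ' ', '_', 'E']]

theorem pvEmitP_nil (w : List Char) (pw : Bool) : pvEmitP w pw [] = pvEmit w pw := by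
  induction w generalizing pw with
  | nil => rfl
  | cons c r ih =>
    cases r with
    | nil => rfl
    | cons d r' =>
      show pvTok c pw (PySem.Chars.isspace d) :: pvEmitP (d :: r') false []
          = pvTok c pw (PySem.Chars.isspace d) :: pvEmit (d :: r') false
      rw [ih]

theorem pvEmitP_ws (w : List Char) (pw : Bool) (c : Char) (cs : List Char)
    (hc : PySem.Chars.isspace c = true) : pvEmitP w pw (c :: cs) = pvEmit w pw := by
  induction w generalizing pw with
  | nil => rfl
  | cons a r ih =>
    cases r with
    | nil =>
      show [pvTok a pw (PySem.Chars.isspace c)] = [pvTok a pw true]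
      rw [hc]
    | cons d r' =>
      show pvTok a pw (PySem.Chars.isspace d) :: pvEmitP (d :: r') false (c :: cs)
          = pvTok a pw (PySem.Chars.isspace d) :: pvEmit (d :: r') false
      rw [ih]

theorem pvEmitP_snoc (w : List Char) (pw : Bool) (c : Char) (cs : List Char) :
    pvEmitP (w ++ [c]) pw cs
      = pvEmitP w pw (c :: cs) ++ [pvTok c (if w.isEmpty then pw else false) (pvNextWs cs)] := by
  induction w generalizing pw with
  | nil => rfl
  | cons a r ih =>
    cases r with
    | nil => rfl
    | cons d r' =>
      show pvTok a pw (PySem.Chars.isspace d) :: pvEmitP ((d :: r') ++ [c]) false cs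
          = pvTok a pw (PySem.Chars.isspace d)
              :: (pvEmitP (d :: r') false (c :: cs) ++ [pvTok c false (pvNextWs cs)])
      rw [ih]
      simp

-- the tail of a whitespace-free multi-char word: middles get _M, the last gets _E
theorem pvEmit_tail (r : List Char) (hr : r ≠ []) (hws : ∀ c ∈ r, PySem.Chars.isspace c = false) :
    pvEmit r false
      = r.dropLast.map (fun c => String.ofList [c, '_', 'M'])
          ++ [String.ofList [r.getLast hr, '_', 'E']] := by
  induction r with
  | nil => exact absurd rfl hr
  | cons a r' ih =>
    cases r' with
    | nil =>
      show [pvTok a false true] = [] ++ [String.ofList [a, '_', 'E']]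
      simp [pvTok]
    | cons b r'' =>
      have hb : PySem.Chars.isspace b = false := hws b (by simp)
      have hrec := ih (by simp) (fun c hc => hws c (List.mem_cons_of_mem a hc))
      have hlast : (a :: b :: r'').getLast (by simp) = (b :: r'').getLast (by simp) := by
        simp [List.getLast]
      show pvTok a false (PySem.Chars.isspace b) :: pvEmit (b :: r'') false
          = ((a :: b :: r'').dropLast.map (fun c => String.ofList [c, '_', 'M'])
              ++ [String.ofList [(a :: b :: r'').getLast (by simp), '_', 'E']])
      rw [hrec, hb, hlast]
      simp [pvTok]

-- A's chunk of a nonempty whitespace-free word is exactly pvEmit of it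
theorem pvChunkA_eq_emit (w : List Char) (hw : w ≠ [])
    (hws : ∀ c ∈ w, PySem.Chars.isspace c = false) :
    pvChunkA w = pvEmit w true := by
  cases w with
  | nil => exact absurd rfl hw
  | cons c rest =>
    cases rest with
    | nil => simp [pvChunkA, pvEmit, pvNextWs, pvTok, PySem.Chars.len_eq]
    | cons d rest' =>
      have hd : PySem.Chars.isspace d = false := hws d (by simp)
      have hne1 : ¬ PySem.Chars.len (c :: d :: rest') = 1 := by
        simp [PySem.Chars.len_eq]; omega
      have hget0 : PySem.List.pyGetD (c :: d :: rest') 0 ' ' = c := PySem.List.pyGetD_zero_cons _ _ _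
      have hgetL : PySem.List.pyGetD (c :: d :: rest') (-1) ' '
          = (c :: d :: rest').getLast (by simp) :=
        PySem.List.pyGetD_neg_one _ _ (by simp)
      have hslice : PySem.List.slice (c :: d :: rest') (some 1) (some (-1)) = (d :: rest').dropLast := by
        simp [PySem.List.slice, PySem.List.clampIdx]
        rw [if_neg (by omega), List.dropLast_eq_take]
        simp
      have htail := pvEmit_tail (d :: rest') (by simp) (fun x hx => hws x (List.mem_cons_of_mem c hx))
      have hlast : (c :: d :: rest').getLast (by simp) = (d :: rest').getLast (by simp) := by
        simp [List.getLast]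
      have hhead : pvEmit (c :: d :: rest') true
          = pvTok c true (PySem.Chars.isspace d) :: pvEmit (d :: rest') false := rfl
      rw [hhead, htail, hd]
      simp only [pvChunkA, hne1, if_false]
      rw [hget0, hgetL, hslice, hlast]
      simp [pvTok]

-- the go-invariant: A's words, flat-mapped through pvChunkA, are B's per-character scan
theorem pvGo_invariant (cs : List Char) : ∀ (cur : List Char) (acc : List (List Char)),
    (∀ c ∈ cur, PySem.Chars.isspace c = false) →
    (∀ w ∈ acc, w ≠ [] ∧ ∀ c ∈ w, PySem.Chars.isspace c = false) →
    (PySem.Chars.split₀.go cs cur acc).flatMap pvChunkA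
      = acc.reverse.flatMap pvChunkA ++ pvEmitP cur.reverse true cs ++ pvScan cs cur.isEmpty := by
  induction cs with
  | nil =>
    intro cur acc hcur hacc
    simp only [PySem.Chars.split₀.go]
    cases cur with
    | nil => simp [pvScan, pvEmitP]
    | cons a r =>
      rw [if_neg (by simp)]
      rw [pvEmitP_nil]
      have := pvChunkA_eq_emit (a :: r).reverse (by simp)
        (by intro c hc; exact hcur c (List.mem_reverse.mp hc))
      simp only [List.reverse_cons] at this
      simp [pvScan, this]
  | cons c rest ih =>
    intro cur acc hcur hacc
    simp only [PySem.Chars.split₀.go]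
    by_cases hc : PySem.Chars.isspace c = true
    · rw [if_pos hc]
      cases cur with
      | nil =>
        rw [if_pos (by simp)]
        rw [ih [] acc (by simp) hacc]
        simp [pvScan, pvEmitP, hc]
      | cons a r =>
        rw [if_neg (by simp)]
        rw [ih [] ((a :: r).reverse :: acc) (by simp)
          (by
            intro w hw
            rcases List.mem_cons.mp hw with h | h
            · subst h
              exact ⟨by simp, by intro x hx; exact hcur x (List.mem_reverse.mp hx)⟩
            · exact hacc w h)]
        rw [pvEmitP_ws _ _ _ _ hc]
        have := pvChunkA_eq_emit (a :: r).reverse (by simp)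
          (by intro x hx; exact hcur x (List.mem_reverse.mp hx))
        simp only [List.reverse_cons] at this
        simp [pvScan, hc, this, pvEmitP]
    · rw [if_neg hc]
      rw [ih (c :: cur) acc
        (by
          intro x hx
          rcases List.mem_cons.mp hx with h | h
          · subst h; simpa using hc
          · exact hcur x h) hacc]
      have hsnoc := pvEmitP_snoc cur.reverse true c rest
      simp only [List.reverse_cons]
      rw [hsnoc]
      have hpe : cur.reverse.isEmpty = cur.isEmpty := by cases cur <;> simp
      simp only [hpe, List.isEmpty_cons]
      have hscan : pvScan (c :: rest) cur.isEmpty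
          = pvTok c cur.isEmpty (pvNextWs rest) :: pvScan rest false := by
        simp [pvScan, hc]
      rw [hscan]
      cases hcure : cur.isEmpty <;> simp

-- B's zip-fold computes pvScan
theorem pvAlt_eq_scan (cs : List Char) : ∀ (prev : Char) (tokens : List String),
    (((cs ++ [' ']).zip (PySem.List.slice (cs ++ [' ']) (some 1) none)).foldl
      (fun st p =>
        if PySem.Chars.isspace p.1 then (p.1, st.2)
        else (p.1, st.2 ++ [String.ofList [p.1, '_',
          if PySem.Chars.isspace st.1 && PySem.Chars.isspace p.2 then 'S'
          else if PySem.Chars.isspace st.1 then 'B'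
          else if PySem.Chars.isspace p.2 then 'E'
          else 'M']]))
      (prev, tokens)).2 = tokens ++ pvScan cs (PySem.Chars.isspace prev) := by
  induction cs with
  | nil =>
    intro prev tokens
    simp [PySem.List.slice_from, pvScan]
  | cons c rest ih =>
    intro prev tokens
    have hslice1 : ∀ (l : List Char), PySem.List.slice l (some 1) none = l.drop 1 := by
      intro l; rw [PySem.List.slice_from] <;> simp
    rw [hslice1]
    have hstep : ((c :: rest) ++ [' ']).zip (((c :: rest) ++ [' ']).drop 1)
        = (c, (rest ++ [' ']).head (by simp))
          :: ((rest ++ [' ']).zip ((rest ++ [' ']).drop 1)) := by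
      cases rest with
      | nil => simp
      | cons d r => simp
    simp only [List.cons_append, List.drop_succ_cons, List.drop_zero] at hstep ⊢
    rw [hstep, List.foldl_cons]
    by_cases hc : PySem.Chars.isspace c = true
    · rw [if_pos hc]
      rw [← hslice1, ih c tokens]
      simp [pvScan, hc]
    · rw [if_neg hc]
      rw [← hslice1, ih c]
      have hnext : PySem.Chars.isspace ((rest ++ [' ']).head (by simp)) = pvNextWs rest := by
        cases rest with
        | nil => decide
        | cons d r => rfl
      simp [pvScan, hc, hnext, pvTok]

-- A's foldl over split₀ is the flatMap of pvChunkA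
theorem pvA_eq_flatMap (cs : List Char) :
    (PySem.Chars.split₀ cs).foldl
      (fun tokens word =>
        if PySem.Chars.len word = 1 then
          tokens ++ [String.ofList (word ++ ['_', 'S'])]
        else
          let t1 := tokens ++ [String.ofList [PySem.List.pyGetD word 0 ' ', '_', 'B']]
          let t2 := (PySem.List.slice word (some 1) (some (-1))).foldl
            (fun ts c => ts ++ [String.ofList [c, '_', 'M']]) t1
          t2 ++ [String.ofList [PySem.List.pyGetD word (-1) ' ', '_', 'E']])
      [] = (PySem.Chars.split₀ cs).flatMap pvChunkA := by
  rw [PySem.List.foldl_congr_mem _ _ (fun tokens w => tokens ++ pvChunkA w) _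
    (by
      intro tokens w _
      simp only [pvChunkA]
      by_cases h1 : PySem.Chars.len w = 1
      · rw [if_pos h1, if_pos h1]
      · rw [if_neg h1, if_neg h1, PySem.List.foldl_append_singleton_eq_map]
        simp)]
  rw [PySem.List.foldl_append_eq_flatMap]
  simp

-- ===== VERDICT (by name: the statement is the Claim_ definition above) =====
theorem tokenize_with_context_py_spec : Claim_equal_tokenize_with_context_py := by
  intro text _
  unfold Spec_tokenize_with_context_py tokenize_with_context_py tokenize_with_context_py_alt
  rw [pvA_eq_flatMap, pvAlt_eq_scan text.toList ' ' []]
  have := pvGo_invariant text.toList [] [] (by simp) (by simp)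
  unfold PySem.Chars.split₀
  rw [this]
  simp [pvEmitP]
  rfl
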